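-- pv_equiv track=rewrite | github.com/AleksandrKrivoruchko/pythonTest | testPython/task19_h_w.py | is_string_number
-- ===== SOURCE A (Python) =====
-- def is_string_number(input_str):
--     len_str = len(input_str)
--     is_dot = False
--     i = 0
--     if input_str[i] == '-':
--         i = 1
--     while i < len_str:
--         if input_str[i] == '.':
--             if is_dot:
--                 return False
--             is_dot = True
--             i += 1
--             continue
--         if not input_str[i].isdigit():
--             return False
--         i += 1
--     return True
-- ===== SOURCE B (Python) =====
-- def is_string_number(input_str):
--     rest = input_str[1:] if input_str[0] == '-' else input_str
--     if rest.count('.') > 1: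
--         return False
--     return all(c.isdigit() or c == '.' for c in rest)
-- ===== Notes on version B (the rewrite author's own statement) =====
-- stated objective: simpler
-- what changed: Replaces the index walk with an is_dot flag by two plain passes: count the dots after an optional leading minus and reject more than one, then check every remaining character is a digit or a dot.
import Mathlib
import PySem

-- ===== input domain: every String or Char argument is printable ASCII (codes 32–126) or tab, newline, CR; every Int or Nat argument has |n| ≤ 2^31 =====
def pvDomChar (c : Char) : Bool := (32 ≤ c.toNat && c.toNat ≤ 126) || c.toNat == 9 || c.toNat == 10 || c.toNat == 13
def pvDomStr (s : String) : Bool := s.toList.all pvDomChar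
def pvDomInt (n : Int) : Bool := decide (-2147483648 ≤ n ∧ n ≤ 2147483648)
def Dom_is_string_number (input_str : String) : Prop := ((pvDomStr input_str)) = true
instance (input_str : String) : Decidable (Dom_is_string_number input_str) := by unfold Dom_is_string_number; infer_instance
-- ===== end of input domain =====

-- B counts the dots after an optional leading minus in a separate pass and then validates
-- characters with all, instead of A's single index walk carrying an is_dot flag; objective: simpler.


-- ===== PORT A =====
-- the while loop over indices i..len, carrying the is_dot flag; iterating over the suffix list
-- is the same traversal (input_str[i] for increasing i)
def isStringNumberLoopA (cs : List Char) (isDot : Bool) : Bool :=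
  match cs with
  | [] => true
  | c :: rest =>
    if c = '.' then
      if isDot then false
      else isStringNumberLoopA rest true
    else if ¬ PySem.Chars.isdigit c then false
    else isStringNumberLoopA rest isDot

def is_string_number (input_str : String) : Bool :=
  match PySem.List.pyGet? input_str.toList 0 with
  | none => false  -- input_str[0] raises IndexError in Python; outside Pre_
  | some c => isStringNumberLoopA (if c = '-' then input_str.toList.drop 1 else input_str.toList) false

-- ===== PORT B =====
def is_string_number_alt (input_str : String) : Bool :=
  match PySem.List.pyGet? input_str.toList 0 with
  | none => false  -- input_str[0] raises IndexError in Python; outside Pre_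
  | some c =>
    let rest := if c = '-' then PySem.List.slice input_str.toList (some 1) else input_str.toList
    -- rest.count('.'): str.count with a one-char pattern is exactly the character count
    if rest.count '.' > 1 then false
    else rest.all (fun ch => PySem.Chars.isdigit ch || ch = '.')

-- ===== PRECONDITION & SPEC =====
-- Pre_ excludes only the empty string, on which both A and B raise IndexError at input_str[0]
def Pre_is_string_number (input_str : String) : Prop := input_str ≠ ""
instance (input_str : String) : Decidable (Pre_is_string_number input_str) := by unfold Pre_is_string_number; infer_instance
def pvWitness_is_string_number : String := "-12.5"

def Spec_is_string_number (input_str : String) (out : Bool) : Prop := out = is_string_number_alt input_str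
instance (input_str : String) (out : Bool) : Decidable (Spec_is_string_number input_str out) := by unfold Spec_is_string_number; infer_instance

-- ===== CLAIM (what is proved, stated in full; the proofs are below) =====
def Claim_equal_is_string_number : Prop := ∀ (input_str : String), Dom_is_string_number input_str → Pre_is_string_number input_str → Spec_is_string_number input_str (is_string_number input_str)

-- ===== LEMMAS AND PROOFS =====

-- A's walk computes exactly "dots within budget and every char a digit or dot"
theorem loopA_char (cs : List Char) (isDot : Bool) :
    isStringNumberLoopA cs isDot =
      ((cs.count '.' ≤ (if isDot then 0 else 1)) &&
        cs.all (fun ch => PySem.Chars.isdigit ch || ch = '.')) := by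
  induction cs generalizing isDot with
  | nil => simp [isStringNumberLoopA]
  | cons c rest ih =>
    by_cases hc : c = '.'
    · subst hc
      cases isDot with
      | true => simp [isStringNumberLoopA]
      | false =>
        simp only [isStringNumberLoopA, ih, List.count_cons, List.all_cons]
        simp
    · by_cases hd : PySem.Chars.isdigit c = true
      · simp [isStringNumberLoopA, hc, hd, ih]
      · simp [isStringNumberLoopA, hc, hd]

theorem slice_one_eq_drop (cs : List Char) :
    PySem.List.slice cs (some 1) = cs.drop 1 := by
  simpa using PySem.List.slice_from cs (by norm_num : (0:Int) ≤ 1)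

-- ===== VERDICT (by name: the statement is the Claim_ definition above) =====
theorem is_string_number_spec : Claim_equal_is_string_number := by
  intro s _ _
  show is_string_number s = is_string_number_alt s
  unfold is_string_number is_string_number_alt
  cases h : PySem.List.pyGet? s.toList 0 with
  | none => rfl
  | some c =>
    simp only [slice_one_eq_drop, loopA_char]
    set rest := if c = '-' then s.toList.drop 1 else s.toList with hrest
    by_cases hle : rest.count '.' ≤ 1
    · simp [hle, Nat.not_lt.mpr hle]
    · simp [hle, Nat.not_le.mp hle]
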